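-- pv_equiv track=rewrite | github.com/morauszkia/advent-of-code-2025 | D5/main.py | count_in_range_numbers
-- ===== SOURCE A (Python) =====
-- from bisect import bisect_right
--
-- def count_in_range_numbers(ranges, numbers):
--     range_starts = [start for start, _ in ranges]
--     count = 0
--
--     for number in numbers:
--         i = bisect_right(range_starts, number)
--         if i == 0:
--             continue
--
--         start, end = ranges[i - 1]
--         if start <= number <= end:
--             count += 1
--
--     return count
-- ===== SOURCE B (Python) =====
-- def count_in_range_numbers(ranges, numbers):
--     count = 0
--     ptr = 0
--     for number in sorted(numbers):
--         while ptr < len(ranges) and ranges[ptr][0] <= number: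
--             ptr += 1
--         if ptr > 0:
--             start, end = ranges[ptr - 1]
--             if start <= number <= end:
--                 count += 1
--     return count
-- ===== Notes on version B (the rewrite author's own statement) =====
-- stated objective: alternative
-- what changed: Replaces the per-number binary search (bisect_right over range starts) by sorting the numbers once and sweeping a single forward-only pointer through the ranges, so each range boundary is crossed at most once.
-- outside the precondition, e.g. on count_in_range_numbers([(5, 9), (0, 3)], [2]): A returns 1, B returns 0
import Mathlib
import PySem

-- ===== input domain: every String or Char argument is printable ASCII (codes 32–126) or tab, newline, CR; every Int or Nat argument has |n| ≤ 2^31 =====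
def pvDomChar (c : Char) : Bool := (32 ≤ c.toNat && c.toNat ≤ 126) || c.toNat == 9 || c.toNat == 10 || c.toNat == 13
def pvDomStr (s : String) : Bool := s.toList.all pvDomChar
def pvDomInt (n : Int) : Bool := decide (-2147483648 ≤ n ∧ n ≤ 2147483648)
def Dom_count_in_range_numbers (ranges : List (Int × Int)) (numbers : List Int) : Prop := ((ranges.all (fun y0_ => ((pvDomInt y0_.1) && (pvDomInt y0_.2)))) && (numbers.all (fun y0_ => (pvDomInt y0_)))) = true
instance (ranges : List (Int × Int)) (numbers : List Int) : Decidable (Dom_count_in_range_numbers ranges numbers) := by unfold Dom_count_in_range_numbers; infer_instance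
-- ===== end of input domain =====

-- B sorts the numbers once and sweeps one forward-only pointer over the ranges
-- instead of running a fresh binary search (bisect_right) per number (objective: alternative).


-- ===== PORT A =====
def count_in_range_numbers (ranges : List (Int × Int)) (numbers : List Int) : Int :=
  let range_starts := ranges.map (fun p => p.1)
  numbers.foldl (fun count number =>
    let i := PySem.List.bisectRight range_starts number
    if i = 0 then count
    else
      -- ranges[i-1]: 1 ≤ i ≤ ranges.length always holds here, so the default is never read
      let se := ranges.getD (i - 1) (0, 0)
      if se.1 ≤ number ∧ number ≤ se.2 then count + 1 else count) 0

-- ===== PORT B =====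
-- the inner `while ptr < len(ranges) and ranges[ptr][0] <= number: ptr += 1`
def pvAdvance (ranges : List (Int × Int)) (number : Int) (ptr : Nat) : Nat :=
  if ptr < ranges.length ∧ (ranges.getD ptr (0, 0)).1 ≤ number then
    pvAdvance ranges number (ptr + 1)
  else ptr
termination_by ranges.length - ptr
decreasing_by omega

def count_in_range_numbers_alt (ranges : List (Int × Int)) (numbers : List Int) : Int :=
  ((PySem.List.sorted numbers (fun x => x) false).foldl
    (fun (s : Int × Nat) number =>
      let ptr := pvAdvance ranges number s.2
      if 0 < ptr then
        let se := ranges.getD (ptr - 1) (0, 0)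
        (if se.1 ≤ number ∧ number ≤ se.2 then s.1 + 1 else s.1, ptr)
      else (s.1, ptr)) (0, 0)).1

-- ===== PRECONDITION & SPEC =====
-- Pre_ excludes inputs whose range starts are not non-decreasing (bisect_right is only
-- specified on sorted lists; A's value there is an accident of the binary-search path),
-- except the trivial such inputs — no numbers, or every number below all starts or at/above
-- all starts — where the starts' order cannot influence either result.
def Pre_count_in_range_numbers (ranges : List (Int × Int)) (numbers : List Int) : Prop :=
  (ranges.map (fun p => p.1)).Pairwise (fun a b => a ≤ b) ∨ numbers = [] ∨
    (∀ x ∈ numbers, (∀ p ∈ ranges, x < p.1) ∨ (∀ p ∈ ranges, p.1 ≤ x))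
instance (ranges : List (Int × Int)) (numbers : List Int) : Decidable (Pre_count_in_range_numbers ranges numbers) := by unfold Pre_count_in_range_numbers; infer_instance

def pvWitness_count_in_range_numbers : (List (Int × Int)) × List Int := ([(0, 3), (5, 9)], [2, 7, 100])

def Spec_count_in_range_numbers (ranges : List (Int × Int)) (numbers : List Int) (out : Int) : Prop := out = count_in_range_numbers_alt ranges numbers
instance (ranges : List (Int × Int)) (numbers : List Int) (out : Int) : Decidable (Spec_count_in_range_numbers ranges numbers out) := by unfold Spec_count_in_range_numbers; infer_instance

-- ===== CLAIM (what is proved, stated in full; the proofs are below) =====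
def Claim_equal_count_in_range_numbers : Prop := ∀ (ranges : List (Int × Int)) (numbers : List Int), Dom_count_in_range_numbers ranges numbers → Pre_count_in_range_numbers ranges numbers → Spec_count_in_range_numbers ranges numbers (count_in_range_numbers ranges numbers)

-- ===== LEMMAS AND PROOFS =====

-- contribution of one number (proof-side helper)
def pvHit (ranges : List (Int × Int)) (x : Int) : Int :=
  let i := PySem.List.bisectRight (ranges.map (fun p => p.1)) x
  if i = 0 then 0
  else
    let se := ranges.getD (i - 1) (0, 0)
    if se.1 ≤ x ∧ x ≤ se.2 then 1 else 0

theorem pvA_fold (ranges : List (Int × Int)) (numbers : List Int) (c : Int) :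
    numbers.foldl (fun count number =>
      let i := PySem.List.bisectRight (ranges.map (fun p => p.1)) number
      if i = 0 then count
      else
        let se := ranges.getD (i - 1) (0, 0)
        if se.1 ≤ number ∧ number ≤ se.2 then count + 1 else count) c
    = c + (numbers.map (pvHit ranges)).sum := by
  induction numbers generalizing c with
  | nil => simp
  | cons x t ih =>
    simp only [List.foldl_cons, List.map_cons, List.sum_cons, ih, pvHit]
    split_ifs <;> ring

theorem pvAdvance_eq_bisect (ranges : List (Int × Int)) (x : Int) (ptr : Nat)
    (hp : (ranges.map (fun p => p.1)).Pairwise (fun a b => a ≤ b))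
    (hptr : ptr ≤ ranges.length)
    (hlow : ∀ j, (hj : j < ranges.length) → j < ptr → (ranges[j]).1 ≤ x) :
    pvAdvance ranges x ptr = PySem.List.bisectRight (ranges.map (fun p => p.1)) x := by
  obtain ⟨hle, hlt, hgt⟩ := PySem.List.bisectRight_spec (ranges.map (fun p => p.1)) x hp
  simp only [List.length_map] at hle
  rw [pvAdvance]
  by_cases h : ptr < ranges.length ∧ (ranges.getD ptr (0, 0)).1 ≤ x
  · obtain ⟨h1, h2⟩ := h
    rw [List.getD_eq_getElem ranges (0,0) h1] at h2
    have hmem : ptr < PySem.List.bisectRight (ranges.map (fun p => p.1)) x := by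
      by_contra hc
      have := hgt ptr (by simpa using h1) (by omega)
      simp only [List.getElem_map] at this
      omega
    rw [if_pos ⟨h1, by rw [List.getD_eq_getElem ranges (0,0) h1]; exact h2⟩]
    exact pvAdvance_eq_bisect ranges x (ptr + 1) hp (by omega)
      (fun j hj hjp => by
        rcases Nat.lt_or_ge j ptr with hj' | hj'
        · exact hlow j hj hj'
        · have : j = ptr := by omega
          subst this; exact h2)
  · rw [if_neg h]
    have hge : ptr ≤ PySem.List.bisectRight (ranges.map (fun p => p.1)) x := by
      by_contra hc
      have hb : PySem.List.bisectRight (ranges.map (fun p => p.1)) x < ranges.length := by omega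
      have h1 := hgt (PySem.List.bisectRight (ranges.map (fun p => p.1)) x)
        (by simpa using hb) (le_refl _)
      simp only [List.getElem_map] at h1
      have h2 := hlow _ hb (by omega)
      omega
    rcases Nat.lt_or_ge ptr ranges.length with h1 | h1
    · -- stopped because x < ranges[ptr].1
      have h2 : ¬ (ranges.getD ptr (0, 0)).1 ≤ x := fun hx => h ⟨h1, hx⟩
      rw [List.getD_eq_getElem ranges (0,0) h1] at h2
      by_contra hc
      have : ptr < PySem.List.bisectRight (ranges.map (fun p => p.1)) x := by omega
      have := hlt ptr (by simpa using h1) this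
      simp only [List.getElem_map] at this
      omega
    · omega
termination_by ranges.length - ptr
decreasing_by omega

theorem pvB_fold (ranges : List (Int × Int)) (l : List Int) (c : Int) (ptr : Nat)
    (hp : (ranges.map (fun p => p.1)).Pairwise (fun a b => a ≤ b))
    (hl : l.Pairwise (fun a b => a ≤ b))
    (hptr : ptr ≤ ranges.length)
    (hlow : ∀ y ∈ l, ∀ j, (hj : j < ranges.length) → j < ptr → (ranges[j]).1 ≤ y) :
    (l.foldl (fun (s : Int × Nat) number =>
      let ptr := pvAdvance ranges number s.2
      if 0 < ptr then
        let se := ranges.getD (ptr - 1) (0, 0)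
        (if se.1 ≤ number ∧ number ≤ se.2 then s.1 + 1 else s.1, ptr)
      else (s.1, ptr)) (c, ptr)).1
    = c + (l.map (pvHit ranges)).sum := by
  induction l generalizing c ptr with
  | nil => simp
  | cons x t ih =>
    obtain ⟨hle, hlt, hgt⟩ := PySem.List.bisectRight_spec (ranges.map (fun p => p.1)) x hp
    simp only [List.length_map] at hle
    have hadv : pvAdvance ranges x ptr = PySem.List.bisectRight (ranges.map (fun p => p.1)) x :=
      pvAdvance_eq_bisect ranges x ptr hp hptr (fun j hj hjp => hlow x (by simp) j hj hjp)
    have hxle : ∀ y ∈ t, x ≤ y := fun y hy => (List.pairwise_cons.mp hl).1 y hy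
    have hlow' : ∀ y ∈ t, ∀ j, (hj : j < ranges.length) →
        j < PySem.List.bisectRight (ranges.map (fun p => p.1)) x → (ranges[j]).1 ≤ y := by
      intro y hy j hj hjb
      have := hlt j (by simpa using hj) hjb
      simp only [List.getElem_map] at this
      exact le_trans this (hxle y hy)
    simp only [List.foldl_cons, List.map_cons, List.sum_cons, hadv]
    by_cases h0 : 0 < PySem.List.bisectRight (ranges.map (fun p => p.1)) x
    · rw [if_pos h0]
      have hne : PySem.List.bisectRight (ranges.map (fun p => p.1)) x ≠ 0 := by omega
      have hpv : pvHit ranges x =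
          (if (ranges.getD (PySem.List.bisectRight (ranges.map (fun p => p.1)) x - 1) (0, 0)).1 ≤ x ∧
              x ≤ (ranges.getD (PySem.List.bisectRight (ranges.map (fun p => p.1)) x - 1) (0, 0)).2
            then (1 : Int) else 0) := by
        simp only [pvHit]
        rw [if_neg hne]
      rw [ih _ _ (List.pairwise_cons.mp hl).2 hle hlow', hpv]
      split_ifs <;> ring
    · rw [if_neg h0]
      have hpv : pvHit ranges x = 0 := by
        simp only [pvHit]
        rw [if_pos (by omega)]
      rw [ih _ _ (List.pairwise_cons.mp hl).2 (by omega)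
        (by intro y hy j hj hjp; exact hlow' y hy j hj (by omega)), hpv]
      ring

-- bisect_right on a list every element of which exceeds x is 0 (no sortedness needed)
theorem pvBisectLoop_all_gt (xs : List Int) (x : Int)
    (hgt : ∀ j, (hj : j < xs.length) → x < xs[j]) :
    ∀ fuel lo hi, hi ≤ xs.length → PySem.List.bisectRightLoop xs x fuel lo hi = lo := by
  intro fuel
  induction fuel with
  | zero => intro lo hi _; rfl
  | succ f ih =>
    intro lo hi hhi
    rw [PySem.List.bisectRightLoop]
    by_cases hlh : lo < hi
    · rw [if_pos hlh]
      have hmid : (lo + hi) / 2 < xs.length := by omega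
      rw [List.getElem?_eq_getElem hmid]
      simp only
      rw [if_pos (hgt _ hmid)]
      exact ih lo _ (by omega)
    · rw [if_neg hlh]

-- bisect_right on a list every element of which is ≤ x is the length (no sortedness needed)
theorem pvBisectLoop_all_le (xs : List Int) (x : Int)
    (hle : ∀ j, (hj : j < xs.length) → xs[j] ≤ x) :
    ∀ fuel lo hi, lo ≤ hi → hi ≤ xs.length → hi - lo ≤ fuel →
      PySem.List.bisectRightLoop xs x fuel lo hi = hi := by
  intro fuel
  induction fuel with
  | zero =>
    intro lo hi h1 _ h3
    have h4 : lo = hi := by omega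
    simp [PySem.List.bisectRightLoop, h4]
  | succ f ih =>
    intro lo hi h1 h2 h3
    rw [PySem.List.bisectRightLoop]
    by_cases hlh : lo < hi
    · rw [if_pos hlh]
      have hmid : (lo + hi) / 2 < xs.length := by omega
      rw [List.getElem?_eq_getElem hmid]
      simp only
      rw [if_neg (by have := hle _ hmid; omega)]
      exact ih _ hi (by omega) h2 (by omega)
    · rw [if_neg hlh]; omega

theorem pvBisect_all_gt (xs : List Int) (x : Int)
    (hgt : ∀ j, (hj : j < xs.length) → x < xs[j]) :
    PySem.List.bisectRight xs x = 0 :=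
  pvBisectLoop_all_gt xs x hgt xs.length 0 xs.length (le_refl _)

theorem pvBisect_all_le (xs : List Int) (x : Int)
    (hle : ∀ j, (hj : j < xs.length) → xs[j] ≤ x) :
    PySem.List.bisectRight xs x = xs.length :=
  pvBisectLoop_all_le xs x hle xs.length 0 xs.length (Nat.zero_le _) (le_refl _) (by omega)

theorem pvAdvance_all_le (ranges : List (Int × Int)) (x : Int)
    (hle : ∀ p ∈ ranges, p.1 ≤ x) :
    ∀ ptr, ptr ≤ ranges.length → pvAdvance ranges x ptr = ranges.length := by
  have main : ∀ k ptr, ptr ≤ ranges.length → ranges.length - ptr = k →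
      pvAdvance ranges x ptr = ranges.length := by
    intro k
    induction k with
    | zero =>
      intro ptr hptr hk
      have h1 : ptr = ranges.length := by omega
      rw [pvAdvance, if_neg (by omega)]
      exact h1
    | succ n ih =>
      intro ptr hptr hk
      have h1 : ptr < ranges.length := by omega
      rw [pvAdvance, if_pos ⟨h1, by
        rw [List.getD_eq_getElem ranges (0,0) h1]
        exact hle _ (List.getElem_mem h1)⟩]
      exact ih (ptr + 1) (by omega) (by omega)
  intro ptr hptr
  exact main (ranges.length - ptr) ptr hptr rfl

-- B's fold on the trivial inputs: every number is below all starts or at/above all starts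
theorem pvB_fold_triv (ranges : List (Int × Int)) (l : List Int) (c : Int) (ptr : Nat)
    (hmix : ∀ x ∈ l, (∀ p ∈ ranges, x < p.1) ∨ (∀ p ∈ ranges, p.1 ≤ x))
    (hl : l.Pairwise (fun a b => a ≤ b))
    (hptr : ptr ≤ ranges.length)
    (hlow : ∀ y ∈ l, ∀ j, (hj : j < ranges.length) → j < ptr → (ranges[j]).1 ≤ y) :
    (l.foldl (fun (s : Int × Nat) number =>
      let ptr := pvAdvance ranges number s.2
      if 0 < ptr then
        let se := ranges.getD (ptr - 1) (0, 0)
        (if se.1 ≤ number ∧ number ≤ se.2 then s.1 + 1 else s.1, ptr)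
      else (s.1, ptr)) (c, ptr)).1
    = c + (l.map (pvHit ranges)).sum := by
  induction l generalizing c ptr with
  | nil => simp
  | cons x t ih =>
    have hxle : ∀ y ∈ t, x ≤ y := fun y hy => (List.pairwise_cons.mp hl).1 y hy
    simp only [List.foldl_cons, List.map_cons, List.sum_cons]
    rcases hmix x (by simp) with hgt | hle
    · -- x is below every start: ptr must be 0, B skips, and bisect gives 0
      have hptr0 : ptr = 0 := by
        by_contra hne
        have h1 : ptr - 1 < ranges.length := by omega
        have := hlow x (by simp) (ptr - 1) h1 (by omega)
        have := hgt _ (List.getElem_mem h1)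
        omega
      subst hptr0
      have hadv : pvAdvance ranges x 0 = 0 := by
        rw [pvAdvance]
        rcases Nat.eq_zero_or_pos ranges.length with h0 | h0
        · rw [if_neg (by omega)]
        · rw [if_neg (by
            rintro ⟨h1, h2⟩
            rw [List.getD_eq_getElem ranges (0,0) h1] at h2
            have := hgt _ (List.getElem_mem h1)
            omega)]
      have hpv : pvHit ranges x = 0 := by
        simp only [pvHit]
        rw [if_pos (by
          rw [pvBisect_all_gt]
          intro j hj
          simp only [List.length_map] at hj
          simp only [List.getElem_map]
          exact hgt _ (List.getElem_mem (by simpa using hj)))]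
      rw [hadv]
      simp only [if_neg (lt_irrefl 0)]
      rw [ih _ _ (fun y hy => hmix y (by simp [hy])) (List.pairwise_cons.mp hl).2
        (Nat.zero_le _) (by intro y hy j hj hjp; omega), hpv]
      ring
    · -- every start is ≤ x: both sides consult the LAST range (index len-1)
      have hadv : pvAdvance ranges x ptr = ranges.length := pvAdvance_all_le ranges x hle ptr hptr
      have hbis : PySem.List.bisectRight (ranges.map (fun p => p.1)) x = ranges.length := by
        rw [pvBisect_all_le]
        · simp
        · intro j hj
          simp only [List.length_map] at hj
          simp only [List.getElem_map]
          exact hle _ (List.getElem_mem (by simpa using hj))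
      have hlow' : ∀ y ∈ t, ∀ j, (hj : j < ranges.length) → j < ranges.length →
          (ranges[j]).1 ≤ y := by
        intro y hy j hj _
        exact le_trans (hle _ (List.getElem_mem hj)) (hxle y hy)
      rw [hadv]
      rcases Nat.eq_zero_or_pos ranges.length with h0 | h0
      · have hpv : pvHit ranges x = 0 := by
          simp only [pvHit]
          rw [if_pos (by rw [hbis]; omega)]
        simp only [if_neg (by omega : ¬ 0 < ranges.length)]
        rw [ih _ _ (fun y hy => hmix y (by simp [hy])) (List.pairwise_cons.mp hl).2
          (by omega) (by intro y hy j hj hjp; exact hlow' y hy j hj hj), hpv]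
        ring
      · have hpv : pvHit ranges x =
            (if (ranges.getD (ranges.length - 1) (0, 0)).1 ≤ x ∧
                x ≤ (ranges.getD (ranges.length - 1) (0, 0)).2 then (1 : Int) else 0) := by
          simp only [pvHit, hbis]
          rw [if_neg (by omega)]
        simp only [if_pos h0]
        rw [ih _ _ (fun y hy => hmix y (by simp [hy])) (List.pairwise_cons.mp hl).2
          (le_refl _) (by intro y hy j hj hjp; exact hlow' y hy j hj hj), hpv]
        split_ifs <;> ring

-- ===== VERDICT (by name: the statement is the Claim_ definition above) =====
theorem count_in_range_numbers_spec : Claim_equal_count_in_range_numbers := by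
  intro ranges numbers _ hpre
  unfold Spec_count_in_range_numbers count_in_range_numbers count_in_range_numbers_alt
  have hperm : (PySem.List.sorted numbers (fun x => x) false).Perm numbers :=
    PySem.List.sorted_perm numbers (fun x => x) false
  rcases hpre with hpre | hnil | hmix
  · rw [pvA_fold, pvB_fold ranges _ 0 0 hpre
      (by simpa using PySem.List.sorted_pairwise numbers (fun x => x))
      (Nat.zero_le _) (by intro y hy j hj hjp; omega)]
    rw [List.Perm.sum_eq (hperm.map (pvHit ranges))]
  · subst hnil; simp [PySem.List.sorted]
  · rw [pvA_fold, pvB_fold_triv ranges _ 0 0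
      (fun x hx => hmix x (hperm.mem_iff.mp hx))
      (by simpa using PySem.List.sorted_pairwise numbers (fun x => x))
      (Nat.zero_le _) (by intro y hy j hj hjp; omega)]
    rw [List.Perm.sum_eq (hperm.map (pvHit ranges))]
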